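-- pv_equiv track=rewrite | github.com/Warrior2852/Advent-of-Code-2021 | day4p2.py | endcalc
-- ===== SOURCE A (Python) =====
-- def endcalc(board, ignore, last):
--     addtotal = 0
--     for i in range(0, len(board)):
--         for j in range(0, len(board)):
--             do = 1
--             for x in range(0, len(ignore)):
--                 if int(i) == int(ignore[x][0]) and int(j) == int(ignore[x][1]):
--                     do = 0
--             if do == 1:
--                 addtotal += int(board[i][j])
--     total = addtotal * int(last)
--     return total
-- ===== SOURCE B (Python) =====
-- def endcalc(board, ignore, last):
--     n = len(board)
--     total = 0
--     for row in board:
--         total += sum(int(v) for v in row[:n])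
--     seen = set()
--     for p in ignore:
--         seen.add((int(p[0]), int(p[1])))
--     for (a, b) in seen:
--         if 0 <= a < n and 0 <= b < n:
--             total -= int(board[a][b])
--     return total * int(last)
-- ===== Notes on version B (the rewrite author's own statement) =====
-- stated objective: faster
-- what changed: Replaces the per-cell linear scan of ignore (O(n^2*m)) by inclusion-exclusion: sum the whole n x n board once, then subtract each distinct in-range ignore coordinate once from a set built in one pass.
-- outside the precondition, e.g. on endcalc([[1, 2], [3]], [[1, 1]], 1): A returns 6, B raises IndexError
import Mathlib
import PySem

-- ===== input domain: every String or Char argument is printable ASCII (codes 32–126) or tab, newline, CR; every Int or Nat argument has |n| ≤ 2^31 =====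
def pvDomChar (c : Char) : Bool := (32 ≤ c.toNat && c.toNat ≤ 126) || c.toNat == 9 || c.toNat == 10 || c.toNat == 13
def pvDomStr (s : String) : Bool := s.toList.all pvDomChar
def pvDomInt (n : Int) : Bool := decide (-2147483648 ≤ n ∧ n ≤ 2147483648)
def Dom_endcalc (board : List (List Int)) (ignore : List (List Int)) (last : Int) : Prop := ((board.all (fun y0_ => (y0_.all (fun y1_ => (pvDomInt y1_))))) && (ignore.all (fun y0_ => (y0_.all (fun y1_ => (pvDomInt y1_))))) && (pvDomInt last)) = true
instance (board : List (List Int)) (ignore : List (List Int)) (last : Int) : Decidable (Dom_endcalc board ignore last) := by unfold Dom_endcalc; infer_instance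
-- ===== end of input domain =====

-- B replaces the per-cell scan of ignore by one full-board sum plus a one-pass dedup set of ignore
-- coordinates subtracted once each (objective: faster).
-- ===== PORT A =====
def endcalc (board : List (List Int)) (ignore : List (List Int)) (last : Int) : Int :=
  let n : Int := board.length
  let addtotal : Int :=
    (PySem.List.pyRange 0 n 1).foldl (fun acc i =>
      (PySem.List.pyRange 0 n 1).foldl (fun acc j =>
        let d : Int :=
          (PySem.List.pyRange 0 (ignore.length : Int) 1).foldl (fun d x =>
            let p := PySem.List.pyGetD ignore x []
            if i = PySem.List.pyGetD p 0 0 ∧ j = PySem.List.pyGetD p 1 0 then 0 else d) 1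
        if d = 1 then acc + PySem.List.pyGetD (PySem.List.pyGetD board i []) j 0 else acc) acc) 0
  addtotal * last

-- ===== PORT B =====
def endcalc_alt (board : List (List Int)) (ignore : List (List Int)) (last : Int) : Int :=
  let n : Int := board.length
  let total0 : Int := board.foldl (fun acc row => acc + (PySem.List.slice row none (some n)).sum) 0
  let seen : PySem.Set (Int × Int) :=
    ignore.foldl (fun s p =>
      PySem.Set.add s (PySem.List.pyGetD p 0 0, PySem.List.pyGetD p 1 0)) PySem.Set.empty
  let total : Int := seen.foldl (fun acc ab =>
    if 0 ≤ ab.1 ∧ ab.1 < n ∧ 0 ≤ ab.2 ∧ ab.2 < n then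
      acc - PySem.List.pyGetD (PySem.List.pyGetD board ab.1 []) ab.2 0
    else acc) total0
  total * last

-- ===== PRECONDITION & SPEC =====
-- Pre_ excludes inputs where an indexing raises in at least one of the programs: board rows
-- shorter than len(board) and ignore entries shorter than 2 can make A or B raise IndexError
-- (A returns on a few of those when the short cells happen to be ignored; B raises there).
def Pre_endcalc (board : List (List Int)) (ignore : List (List Int)) (last : Int) : Prop :=
  (∀ row ∈ board, board.length ≤ row.length) ∧ (∀ p ∈ ignore, 2 ≤ p.length)
instance (board : List (List Int)) (ignore : List (List Int)) (last : Int) : Decidable (Pre_endcalc board ignore last) := by unfold Pre_endcalc; infer_instance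
def pvWitness_endcalc : List (List Int) × List (List Int) × Int := ([[1, 2], [3, 4]], [[0, 1], [5, 0]], 3)

def Spec_endcalc (board : List (List Int)) (ignore : List (List Int)) (last : Int) (out : Int) : Prop := out = endcalc_alt board ignore last
instance (board : List (List Int)) (ignore : List (List Int)) (last : Int) (out : Int) : Decidable (Spec_endcalc board ignore last out) := by unfold Spec_endcalc; infer_instance

-- ===== CLAIM (what is proved, stated in full; the proofs are below) =====
def Claim_equal_endcalc : Prop := ∀ (board : List (List Int)) (ignore : List (List Int)) (last : Int), Dom_endcalc board ignore last → Pre_endcalc board ignore last → Spec_endcalc board ignore last (endcalc board ignore last)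

-- ===== LEMMAS AND PROOFS =====

-- key of an ignore entry: the coordinate pair A compares against and B inserts into its set
def pvKey (p : List Int) : Int × Int := (PySem.List.pyGetD p 0 0, PySem.List.pyGetD p 1 0)

-- the n x n grid of coordinates, flattened row-major
def pvGrid (n : Nat) : List (Int × Int) :=
  (List.range n).flatMap (fun i : Nat => (List.range n).map (fun j : Nat => ((i : Int), (j : Int))))

-- the board value at a coordinate pair (total pyGetD form, as both ports use)
def pvV (board : List (List Int)) (x : Int × Int) : Int :=
  PySem.List.pyGetD (PySem.List.pyGetD board x.1 []) x.2 0

theorem pvInnerLoop (ign : List (List Int)) (i j c : Int) :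
    ign.foldl (fun d p => if i = PySem.List.pyGetD p 0 0 ∧ j = PySem.List.pyGetD p 1 0 then 0 else d) c
      = if (i, j) ∈ ign.map pvKey then 0 else c := by
  induction ign generalizing c with
  | nil => simp
  | cons p rest ih =>
    simp only [List.foldl_cons, List.map_cons, List.mem_cons, ih]
    by_cases h : i = PySem.List.pyGetD p 0 0 ∧ j = PySem.List.pyGetD p 1 0
    · simp [pvKey, Prod.ext_iff, h]
    · simp only [pvKey, Prod.ext_iff] at *
      simp [h]

theorem pvMemGrid (n : Nat) (a b : Int) :
    (a, b) ∈ pvGrid n ↔ 0 ≤ a ∧ a < (n : Int) ∧ 0 ≤ b ∧ b < (n : Int) := by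
  simp only [pvGrid, List.mem_flatMap, List.mem_map, List.mem_range, Prod.mk.injEq]
  constructor
  · rintro ⟨i, hi, j, hj, rfl, rfl⟩
    refine ⟨by positivity, by exact_mod_cast hi, by positivity, by exact_mod_cast hj⟩

  · rintro ⟨ha0, han, hb0, hbn⟩
    exact ⟨a.toNat, by omega, b.toNat, by omega, by omega, by omega⟩

theorem pvNodupGrid (n : Nat) : (pvGrid n).Nodup := by
  refine List.nodup_flatMap.2 ⟨?_, ?_⟩
  · intro i _
    exact (List.nodup_range).map (fun j1 j2 h => by simpa using congrArg Prod.snd h)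
  · refine List.Pairwise.imp ?_ List.nodup_range
    intro i i' hne x hx hx'
    simp only [List.mem_map, List.mem_range] at hx hx'
    obtain ⟨j, _, rfl⟩ := hx
    obtain ⟨j', _, h⟩ := hx'
    have := congrArg Prod.fst h
    simp only at this
    exact hne (by exact_mod_cast this.symm)

theorem pvSumFlatMap {α β : Type} (l : List α) (g : α → List β) (F : β → Int) :
    ((l.flatMap g).map F).sum = (l.map (fun a => ((g a).map F).sum)).sum := by
  induction l with
  | nil => simp
  | cons a l ih => simp [List.flatMap_cons, ih]

theorem pvTakeMapRange {α : Type} (l : List α) (d : α) (n : Nat) (h : n ≤ l.length) :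
    (List.range n).map (fun i => l.getD i d) = l.take n := by
  induction n with
  | zero => simp
  | succ m ih =>
    rw [List.range_succ, List.map_append, ih (by omega), List.take_succ]
    simp [List.getD, List.getElem?_eq_getElem (by omega : m < l.length)]

theorem pvSubB (L : List (Int × Int)) (f : Int × Int → Int) (s : Int × Int) (S' : List (Int × Int))
    (hs : s ∉ L) :
    (L.map (fun x => if x ∈ s :: S' then 0 else f x)).sum
      = (L.map (fun x => if x ∈ S' then 0 else f x)).sum := by
  induction L with
  | nil => rfl
  | cons x L ih =>
    simp only [List.mem_cons, not_or] at hs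
    simp only [List.map_cons, List.sum_cons]
    rw [ih hs.2]
    congr 1
    have hxs : x ≠ s := fun h => hs.1 h.symm
    simp [List.mem_cons, hxs]

theorem pvSubA (L : List (Int × Int)) (f : Int × Int → Int) (s : Int × Int) (S' : List (Int × Int))
    (hL : L.Nodup) (hs : s ∈ L) (hs' : s ∉ S') :
    (L.map (fun x => if x ∈ s :: S' then 0 else f x)).sum
      = (L.map (fun x => if x ∈ S' then 0 else f x)).sum - f s := by
  induction L with
  | nil => simp at hs
  | cons x L ih =>
    obtain ⟨hx, hLnd⟩ := List.nodup_cons.1 hL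
    simp only [List.map_cons, List.sum_cons]
    rcases List.mem_cons.1 hs with h | h
    · subst h
      rw [pvSubB L f s S' hx]
      simp [hs']
    · have hxs : x ≠ s := fun he => hx (he ▸ h)
      rw [ih hLnd h]
      have hiff : (x ∈ s :: S') ↔ (x ∈ S') := by simp [List.mem_cons, hxs]
      simp only [hiff]
      ring
theorem pvMain (S L : List (Int × Int)) (f : Int × Int → Int)
    (hL : L.Nodup) (hS : S.Nodup) :
    (L.map f).sum - (S.map (fun s => if s ∈ L then f s else 0)).sum
      = (L.map (fun x => if x ∈ S then 0 else f x)).sum := by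
  induction S with
  | nil => simp
  | cons s S' ih =>
    obtain ⟨hs', hS'⟩ := List.nodup_cons.1 hS
    simp only [List.map_cons, List.sum_cons]
    by_cases hmem : s ∈ L
    · rw [pvSubA L f s S' hL hmem hs', ← ih hS']
      simp [hmem]
      ring
    · rw [pvSubB L f s S' hmem, ← ih hS']
      simp [hmem]

theorem pvSumNeg {α : Type} (l : List α) (g : α → Int) :
    (l.map (fun x => -(g x))).sum = -((l.map g).sum) := by
  induction l with
  | nil => simp
  | cons x l ih => simp [ih]; ring

-- A's value as a filtered grid sum
theorem pvA_char (board ignore : List (List Int)) (last : Int) :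
    endcalc board ignore last
      = ((pvGrid board.length).map
          (fun x => if x ∈ ignore.map pvKey then 0 else pvV board x)).sum * last := by
  unfold endcalc
  dsimp only
  rw [show (PySem.List.pyRange 0 (board.length : Int) 1)
      = (List.range board.length).map (fun k : Nat => (k : Int)) from PySem.List.pyRange_zero_nat _]
  congr 1
  have hbody : ∀ i : Int, (fun (acc j : Int) =>
      if (PySem.List.pyRange 0 (ignore.length : Int) 1).foldl (fun (d : Int) x =>
          if i = PySem.List.pyGetD (PySem.List.pyGetD ignore x []) 0 0 ∧
             j = PySem.List.pyGetD (PySem.List.pyGetD ignore x []) 1 0 then 0 else d) 1 = 1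
      then acc + PySem.List.pyGetD (PySem.List.pyGetD board i []) j 0 else acc)
      = fun acc j => acc + (if (i, j) ∈ ignore.map pvKey then 0 else pvV board (i, j)) := by
    intro i
    funext acc j
    rw [PySem.List.foldl_pyRange_zero_pyGetD' ignore []
        (fun (d : Int) p =>
          if i = PySem.List.pyGetD p 0 0 ∧ j = PySem.List.pyGetD p 1 0 then 0 else d) 1,
      pvInnerLoop ignore i j 1]
    by_cases h : (i, j) ∈ ignore.map pvKey <;> simp [h, pvV]
  rw [PySem.List.foldl_congr_mem _ _
    (fun (acc : Int) (i : Int) =>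
      acc + (((List.range board.length).map (fun k : Nat => (k : Int))).map
        (fun j => if (i, j) ∈ ignore.map pvKey then 0 else pvV board (i, j))).sum) _
    (fun acc i _ => by rw [hbody i, PySem.List.foldl_add]),
    PySem.List.foldl_add]
  simp only [pvGrid, pvSumFlatMap, List.map_map, Function.comp_def, zero_add]

-- B's value: full sum minus distinct in-range ignore sum
theorem pvB_char (board ignore : List (List Int)) (last : Int)
    (hb : ∀ row ∈ board, board.length ≤ row.length) :
    endcalc_alt board ignore last
      = (((pvGrid board.length).map (pvV board)).sum
         - ((PySem.Set.ofList (ignore.map pvKey)).map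
             (fun s => if s ∈ pvGrid board.length then pvV board s else 0)).sum) * last := by
  unfold endcalc_alt
  dsimp only
  congr 1
  have hseen : ignore.foldl (fun s p =>
      PySem.Set.add s (PySem.List.pyGetD p 0 0, PySem.List.pyGetD p 1 0)) PySem.Set.empty
      = PySem.Set.ofList (ignore.map pvKey) := by
    rw [← PySem.Set.update_map_eq_foldl_add ignore
          (fun p => (PySem.List.pyGetD p 0 0, PySem.List.pyGetD p 1 0)) PySem.Set.empty,
        PySem.Set.update_empty]
    rfl
  rw [hseen]
  have pvMapSum : ∀ (g : List Int → Int),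
      ((List.range board.length).map (fun i => g (board.getD i []))).sum = (board.map g).sum := by
    intro g
    have hb0 : (List.range board.length).map (fun i => board.getD i []) = board := by
      rw [pvTakeMapRange board [] board.length (le_refl _), List.take_length]
    conv_rhs => rw [← hb0]
    rw [List.map_map]
    rfl
  have htotal0 : board.foldl
      (fun acc row => acc + (PySem.List.slice row none (some (board.length : Int))).sum) 0
      = ((pvGrid board.length).map (pvV board)).sum := by
    rw [PySem.List.foldl_add, zero_add,
      ← pvMapSum (fun row => (PySem.List.slice row none (some (board.length : Int))).sum)]
    rw [show ((pvGrid board.length).map (pvV board)).sum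
        = ((List.range board.length).map (fun i : Nat =>
            ((List.range board.length).map (fun j : Nat =>
              (board.getD i []).getD j 0)).sum)).sum by
      simp only [pvGrid, pvSumFlatMap, List.map_map, Function.comp_def, pvV,
        PySem.List.pyGetD_natCast]]
    apply congrArg
    apply List.map_congr_left
    intro i hi
    have hlt : i < board.length := List.mem_range.1 hi
    have hlen : board.length ≤ (board.getD i []).length := by
      rw [List.getD_eq_getElem board [] hlt]
      exact hb _ (List.getElem_mem hlt)
    rw [PySem.List.slice_to _ (by positivity), Int.toNat_natCast,
      ← pvTakeMapRange (board.getD i []) 0 board.length hlen]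
  rw [htotal0]
  rw [PySem.List.foldl_congr_mem _ _
    (fun (acc : Int) ab => acc + (if ab ∈ pvGrid board.length then -(pvV board ab) else 0)) _ ?_]
  · rw [PySem.List.foldl_add]
    have hneg : ((PySem.Set.ofList (ignore.map pvKey)).map
        (fun ab => if ab ∈ pvGrid board.length then -(pvV board ab) else 0)).sum
        = -(((PySem.Set.ofList (ignore.map pvKey)).map
            (fun s => if s ∈ pvGrid board.length then pvV board s else 0)).sum) := by
      rw [← pvSumNeg]
      apply congrArg
      apply List.map_congr_left
      intro x _
      by_cases h : x ∈ pvGrid board.length <;> simp [h]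
    rw [hneg]
    ring
  · intro acc ab _
    have hmem : (0 ≤ ab.1 ∧ ab.1 < (board.length : Int) ∧ 0 ≤ ab.2 ∧ ab.2 < (board.length : Int))
        ↔ ab ∈ pvGrid board.length := by
      rw [show ab = (ab.1, ab.2) from rfl, pvMemGrid]
    by_cases h : ab ∈ pvGrid board.length
    · simp [pvV, hmem.2 h, h, sub_eq_add_neg]
    · have hc : ¬(0 ≤ ab.1 ∧ ab.1 < (board.length : Int) ∧ 0 ≤ ab.2 ∧ ab.2 < (board.length : Int)) :=
        fun hc => h (hmem.1 hc)
      simp [h, hc]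

-- ===== VERDICT (by name: the statement is the Claim_ definition above) =====
theorem endcalc_spec : Claim_equal_endcalc := by
  intro board ignore last _ hpre
  unfold Spec_endcalc
  rw [pvA_char, pvB_char board ignore last hpre.1]
  congr 1
  refine Eq.trans ?_ (pvMain (PySem.Set.ofList (ignore.map pvKey)) (pvGrid board.length)
    (pvV board) (pvNodupGrid _) (PySem.Set.nodup_ofList _)).symm
  apply congrArg
  apply List.map_congr_left
  intro x _
  by_cases h : x ∈ ignore.map pvKey <;>
    simp [PySem.Set.mem_ofList, h]
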